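-- pv_equiv track=rewrite | github.com/Luflexia/BSUIR | 5term/ОКС/МоиЛабы/Л4/бонд/lab4.py | byte_stuffing
-- ===== SOURCE A (Python) =====
-- def byte_stuffing(packet: str):
--     flag = packet[0:2]
--     rest_of_packet = packet[2:]
--
--     stuffed_packet = flag
--     modified_bytes = []
--     i = 0
--
--     while i < len(rest_of_packet):
--         if rest_of_packet[i:i+2] == '@c':
--             stuffed_packet += '96'
--             modified_bytes.append(f'@c -> 96')
--             i += 2
--         elif rest_of_packet[i] == '9':
--             stuffed_packet += '95'
--             modified_bytes.append(f'9 -> 95')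
--             i += 1
--         else:
--             stuffed_packet += rest_of_packet[i]
--             i += 1
--     return stuffed_packet, modified_bytes
-- ===== SOURCE B (Python) =====
-- def byte_stuffing(packet: str):
--     flag = packet[:2]
--     rest = packet[2:]
--     stuffed = flag
--     modified_bytes = []
--     cur = 0
--     while True:
--         a = rest.find('@c', cur)
--         b = rest.find('9', cur)
--         if a == -1 and b == -1:
--             break
--         if a != -1 and (b == -1 or a <= b):
--             stuffed += rest[cur:a] + '96'
--             modified_bytes.append('@c -> 96')
--             cur = a + 2
--         else:
--             stuffed += rest[cur:b] + '95'
--             modified_bytes.append('9 -> 95')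
--             cur = b + 1
--     stuffed += rest[cur:]
--     return stuffed, modified_bytes
-- ===== Notes on version B (the rewrite author's own statement) =====
-- stated objective: alternative
-- what changed: A's one-at-a-time index loop (check '@c'/'9' at every position, append char by char) is replaced by a cursor-and-find scan: str.find locates the next '@c' and the next '9', the earlier match wins, the whole untouched gap rest[cur:match] is copied in one slice and the cursor jumps past the match.
import Mathlib
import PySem

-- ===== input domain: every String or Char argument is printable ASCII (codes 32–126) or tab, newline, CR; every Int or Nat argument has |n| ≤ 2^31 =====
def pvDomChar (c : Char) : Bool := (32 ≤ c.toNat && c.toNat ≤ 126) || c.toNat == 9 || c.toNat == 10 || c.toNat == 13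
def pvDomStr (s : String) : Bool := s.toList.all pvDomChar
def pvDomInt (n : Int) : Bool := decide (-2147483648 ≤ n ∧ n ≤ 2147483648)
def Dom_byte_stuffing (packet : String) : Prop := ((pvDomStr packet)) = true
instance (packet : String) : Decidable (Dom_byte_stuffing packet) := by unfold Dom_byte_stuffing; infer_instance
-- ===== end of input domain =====

-- B replaces A's one-position-at-a-time index loop by a cursor-and-find scan (str.find jumps
-- to the next '@c'/'9', the untouched gap is copied as one slice); objective: alternative.

-- ===== PORT A =====
-- A's while loop over index i; dropping processed chars = advancing i.
-- rest[i:i+2] == '@c' is the take-2 test; strings are handled as List Char (String.mk at the end).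
def bsLoopA (cs : List Char) (out : List Char) (log : List String) : List Char × List String :=
  match cs with
  | [] => (out, log)
  | c :: t =>
    if (c :: t).take 2 = ['@', 'c'] then
      bsLoopA (t.drop 1) (out ++ ['9', '6']) (log ++ ["@c -> 96"])
    else if c = '9' then
      bsLoopA t (out ++ ['9', '5']) (log ++ ["9 -> 95"])
    else
      bsLoopA t (out ++ [c]) log
termination_by cs.length
decreasing_by all_goals (simp; try omega)

def byte_stuffing (packet : String) : String × List String :=
  -- flag = packet[0:2], rest = packet[2:] : exact for these nonnegative slice bounds
  let cs := packet.toList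
  let r := bsLoopA (cs.drop 2) (cs.take 2) []
  (String.mk r.1, r.2)

-- ===== PORT B =====
-- needed only for bsLoopB's termination: find with a start index past the end returns -1
theorem pvFindGt (s sub : List Char) (k : Nat) (h : s.length < k) :
    PySem.Chars.findFrom s sub (k : Int) none = -1 := by
  simp only [PySem.Chars.findFrom]
  have h1 : ¬ ((k : Int) < 0) := by omega
  have h2 : ((s.length : Int) < (k : Int)) := by exact_mod_cast h
  simp [h1, h2]

-- B's while loop: a = rest.find('@c', cur), b = rest.find('9', cur); -1/-1 → exit and copy
-- the tail; otherwise take the earlier match, copy the gap rest[cur:match] in one slice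
-- (= take (match-cur) of drop cur, exact for these nonnegative bounds) and jump past it.
def bsLoopB (rest : List Char) (cur : Nat) (out : List Char) (log : List String) :
    List Char × List String :=
  if h1 : PySem.Chars.findFrom rest ['@', 'c'] (cur : Int) none = -1 ∧
          PySem.Chars.findFrom rest ['9'] (cur : Int) none = -1 then
    (out ++ rest.drop cur, log)
  else if h2 : PySem.Chars.findFrom rest ['@', 'c'] (cur : Int) none ≠ -1 ∧
          (PySem.Chars.findFrom rest ['9'] (cur : Int) none = -1 ∨
           PySem.Chars.findFrom rest ['@', 'c'] (cur : Int) none ≤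
             PySem.Chars.findFrom rest ['9'] (cur : Int) none) then
    bsLoopB rest ((PySem.Chars.findFrom rest ['@', 'c'] (cur : Int) none).toNat + 2)
      (out ++ (rest.drop cur).take ((PySem.Chars.findFrom rest ['@', 'c'] (cur : Int) none).toNat - cur) ++ ['9', '6'])
      (log ++ ["@c -> 96"])
  else
    bsLoopB rest ((PySem.Chars.findFrom rest ['9'] (cur : Int) none).toNat + 1)
      (out ++ (rest.drop cur).take ((PySem.Chars.findFrom rest ['9'] (cur : Int) none).toNat - cur) ++ ['9', '5'])
      (log ++ ["9 -> 95"])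
termination_by rest.length + 1 - cur
decreasing_by
  · by_cases hcur : cur ≤ rest.length
    · have spec := PySem.Chars.findFrom_natCast_spec rest ['@', 'c'] cur hcur h2.1
      have h5 := spec.1
      have h6 := spec.2.1.length_le
      simp [List.length_drop] at h6
      omega
    · exact absurd (pvFindGt rest ['@', 'c'] cur (by omega)) h2.1
  · have hb : PySem.Chars.findFrom rest ['9'] (cur : Int) none ≠ -1 := by tauto
    by_cases hcur : cur ≤ rest.length
    · have spec := PySem.Chars.findFrom_natCast_spec rest ['9'] cur hcur hb
      have h5 := spec.1
      have h6 := spec.2.1.length_le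
      simp [List.length_drop] at h6
      omega
    · exact absurd (pvFindGt rest ['9'] cur (by omega)) hb

def byte_stuffing_alt (packet : String) : String × List String :=
  let cs := packet.toList
  let r := bsLoopB (cs.drop 2) 0 (cs.take 2) []
  (String.mk r.1, r.2)

-- ===== PRECONDITION & SPEC =====
def Spec_byte_stuffing (packet : String) (out : String × List String) : Prop := out = byte_stuffing_alt packet
instance (packet : String) (out : String × List String) : Decidable (Spec_byte_stuffing packet out) := by unfold Spec_byte_stuffing; infer_instance

-- ===== CLAIM (what is proved, stated in full; the proofs are below) =====
def Claim_equal_byte_stuffing : Prop := ∀ (packet : String), Dom_byte_stuffing packet → Spec_byte_stuffing packet (byte_stuffing packet)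

-- ===== LEMMAS AND PROOFS =====

-- a prefix of a later drop is an infix of an earlier drop
theorem pvPrefixInfixDrop (s sub : List Char) (j m : Nat) (hjm : j ≤ m)
    (h : sub <+: s.drop m) : sub <:+: s.drop j := by
  have hdr : s.drop m = (s.drop j).drop (m - j) := by
    rw [List.drop_drop]; congr 1; omega
  rw [List.infix_iff_prefix_suffix]
  exact ⟨s.drop m, h, hdr ▸ List.drop_suffix _ _⟩

-- find at k where the pattern sits exactly at k returns k
theorem pvFindHere (s sub : List Char) (k : Nat) (hk : k ≤ s.length)
    (h : sub <+: s.drop k) : PySem.Chars.findFrom s sub (k : Int) none = (k : Int) := by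
  have hne : PySem.Chars.findFrom s sub (k : Int) none ≠ -1 := fun hc =>
    ((PySem.Chars.findFrom_natCast_eq_neg_one_iff s sub k hk).mp hc) h.isInfix
  have spec := PySem.Chars.findFrom_natCast_spec s sub k hk hne
  have h1 := spec.1
  have hmin := spec.2.2
  by_contra hne'
  have hgt : k < (PySem.Chars.findFrom s sub (k : Int) none).toNat := by omega
  exact hmin k le_rfl hgt h

-- find at k where the pattern does NOT sit at k equals find at k+1
theorem pvFindStep (s sub : List Char) (k : Nat) (hk : k < s.length)
    (h : ¬ sub <+: s.drop k) :
    PySem.Chars.findFrom s sub (k : Int) none = PySem.Chars.findFrom s sub ((k + 1 : Nat) : Int) none := by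
  have hk1 : k + 1 ≤ s.length := hk
  have hk0 : k ≤ s.length := by omega
  by_cases hin : sub <:+: s.drop k
  · have hne : PySem.Chars.findFrom s sub (k : Int) none ≠ -1 := fun hc =>
      ((PySem.Chars.findFrom_natCast_eq_neg_one_iff s sub k hk0).mp hc) hin
    have spec := PySem.Chars.findFrom_natCast_spec s sub k hk0 hne
    have hge : (k : Int) ≤ PySem.Chars.findFrom s sub (k : Int) none := spec.1
    have hpre := spec.2.1
    have hmin := spec.2.2
    have hgt : k + 1 ≤ (PySem.Chars.findFrom s sub (k : Int) none).toNat := by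
      rcases Nat.lt_or_ge k (PySem.Chars.findFrom s sub (k : Int) none).toNat with hlt | hge'
      · omega
      · have : (PySem.Chars.findFrom s sub (k : Int) none).toNat = k := by omega
        rw [this] at hpre; exact absurd hpre h
    have hne' : PySem.Chars.findFrom s sub ((k + 1 : Nat) : Int) none ≠ -1 := fun hc =>
      ((PySem.Chars.findFrom_natCast_eq_neg_one_iff s sub (k + 1) hk1).mp hc)
        (pvPrefixInfixDrop s sub (k + 1) _ hgt hpre)
    have spec' := PySem.Chars.findFrom_natCast_spec s sub (k + 1) hk1 hne'
    have hge2 : ((k + 1 : Nat) : Int) ≤ PySem.Chars.findFrom s sub ((k + 1 : Nat) : Int) none := spec'.1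
    have hpre' := spec'.2.1
    have hmin' := spec'.2.2
    have heq : (PySem.Chars.findFrom s sub (k : Int) none).toNat
        = (PySem.Chars.findFrom s sub ((k + 1 : Nat) : Int) none).toNat := by
      rcases Nat.lt_trichotomy (PySem.Chars.findFrom s sub (k : Int) none).toNat
        (PySem.Chars.findFrom s sub ((k + 1 : Nat) : Int) none).toNat with hlt | heq | hgt'
      · exact absurd hpre (hmin' _ (by omega) hlt)
      · exact heq
      · exact absurd hpre' (hmin _ (by omega) hgt')
    omega
  · have h1 : PySem.Chars.findFrom s sub (k : Int) none = -1 := by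
      rw [PySem.Chars.findFrom_natCast_eq_neg_one_iff s sub k hk0]; exact hin
    have h2 : PySem.Chars.findFrom s sub ((k + 1 : Nat) : Int) none = -1 := by
      rw [PySem.Chars.findFrom_natCast_eq_neg_one_iff s sub (k + 1) hk1]
      exact fun hc => hin (hc.trans (by
        have : s.drop (k + 1) = (s.drop k).drop 1 := by rw [List.drop_drop]
        exact this ▸ (List.drop_suffix 1 (s.drop k)).isInfix))
    rw [h1, h2]

theorem pvDropSucc (rest : List Char) (cur : Nat) (c : Char) (t : List Char)
    (h : rest.drop cur = c :: t) : rest.drop (cur + 1) = t := by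
  have : rest.drop (cur + 1) = (rest.drop cur).drop 1 := by rw [List.drop_drop]
  rw [this, h]; rfl

-- B's gap step: when neither pattern sits at cur, advancing the cursor one char while
-- moving that char into out does not change the result
theorem pvGapStep (rest : List Char) (cur : Nat) (out : List Char) (log : List String)
    (c : Char) (t : List Char) (hdr : rest.drop cur = c :: t)
    (hA : ¬ (['@', 'c'] : List Char) <+: rest.drop cur)
    (h9 : ¬ (['9'] : List Char) <+: rest.drop cur) :
    bsLoopB rest cur out log = bsLoopB rest (cur + 1) (out ++ [c]) log := by
  have hcur : cur < rest.length := by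
    by_contra hc
    have : rest.drop cur = [] := List.drop_eq_nil_of_le (by omega)
    rw [this] at hdr; exact absurd hdr (by simp)
  have hsA := pvFindStep rest ['@', 'c'] cur hcur hA
  have hs9 := pvFindStep rest ['9'] cur hcur h9
  conv_lhs => rw [bsLoopB]
  conv_rhs => rw [bsLoopB]
  rw [hsA, hs9]
  have hdr1 : rest.drop (cur + 1) = t := pvDropSucc rest cur c t hdr
  split_ifs with c1 c2
  · -- both -1: tail copy
    rw [hdr, hdr1]; simp
  · -- '@c' branch
    have hne := c2.1
    have hge : ((cur + 1 : Nat) : Int) ≤ PySem.Chars.findFrom rest ['@', 'c'] ((cur + 1 : Nat) : Int) none :=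
      (PySem.Chars.findFrom_natCast_spec rest ['@', 'c'] (cur + 1) hcur hne).1
    congr 1
    rw [hdr, hdr1]
    have hk : (PySem.Chars.findFrom rest ['@', 'c'] ((cur + 1 : Nat) : Int) none).toNat - cur
        = ((PySem.Chars.findFrom rest ['@', 'c'] ((cur + 1 : Nat) : Int) none).toNat - (cur + 1)) + 1 := by
      omega
    rw [hk, List.take_succ_cons]; simp
  · -- '9' branch
    have hne : PySem.Chars.findFrom rest ['9'] ((cur + 1 : Nat) : Int) none ≠ -1 := by tauto
    have hge : ((cur + 1 : Nat) : Int) ≤ PySem.Chars.findFrom rest ['9'] ((cur + 1 : Nat) : Int) none :=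
      (PySem.Chars.findFrom_natCast_spec rest ['9'] (cur + 1) hcur hne).1
    congr 1
    rw [hdr, hdr1]
    have hk : (PySem.Chars.findFrom rest ['9'] ((cur + 1 : Nat) : Int) none).toNat - cur
        = ((PySem.Chars.findFrom rest ['9'] ((cur + 1 : Nat) : Int) none).toNat - (cur + 1)) + 1 := by
      omega
    rw [hk, List.take_succ_cons]; simp

theorem pvLoopEq (n : Nat) : ∀ (rest : List Char) (cur : Nat) (out : List Char) (log : List String),
    rest.length - cur = n → cur ≤ rest.length →
    bsLoopB rest cur out log = bsLoopA (rest.drop cur) out log := by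
  induction n using Nat.strong_induction_on with
  | _ n ih =>
    intro rest cur out log hn hcur
    rcases hdr : rest.drop cur with _ | ⟨c, t⟩
    · -- cur = length: both patterns absent from the empty tail
      have hlen : rest.length ≤ cur := by
        by_contra hc
        have := List.drop_eq_nil_iff.mp hdr
        omega
      have hcl : cur = rest.length := by omega
      have hA : PySem.Chars.findFrom rest ['@', 'c'] (cur : Int) none = -1 := by
        rw [PySem.Chars.findFrom_natCast_eq_neg_one_iff rest _ cur hcur, hdr]; simp
      have h9 : PySem.Chars.findFrom rest ['9'] (cur : Int) none = -1 := by
        rw [PySem.Chars.findFrom_natCast_eq_neg_one_iff rest _ cur hcur, hdr]; simp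
      rw [bsLoopB]
      simp [hA, h9, hdr, bsLoopA]
    · have hlen : rest.length - cur = t.length + 1 := by
        have := congrArg List.length hdr
        simp [List.length_drop] at this
        omega
      by_cases hAt : (['@', 'c'] : List Char) <+: rest.drop cur
      · -- '@c' sits at cur
        have hAt' := hAt
        obtain ⟨r, hr⟩ := hAt'
        rw [hdr] at hr
        simp only [List.cons_append, List.nil_append] at hr
        injection hr with h1 h2
        subst h1; subst h2
        simp only [List.length_cons] at hlen
        have ha : PySem.Chars.findFrom rest ['@', 'c'] (cur : Int) none = (cur : Int) :=
          pvFindHere rest _ cur hcur hAt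
        have hbge : PySem.Chars.findFrom rest ['9'] (cur : Int) none = -1 ∨
            PySem.Chars.findFrom rest ['@', 'c'] (cur : Int) none ≤
              PySem.Chars.findFrom rest ['9'] (cur : Int) none := by
          by_cases hb : PySem.Chars.findFrom rest ['9'] (cur : Int) none = -1
          · exact Or.inl hb
          · exact Or.inr (by
              rw [ha]; exact (PySem.Chars.findFrom_natCast_spec rest ['9'] cur hcur hb).1)
        rw [bsLoopB]
        rw [dif_neg (by rw [ha]; rintro ⟨h1, -⟩; omega), dif_pos ⟨by rw [ha]; omega, hbge⟩]
        rw [ha]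
        have htoNat : ((cur : Int)).toNat = cur := by omega
        rw [htoNat]
        have hrec := ih (rest.length - (cur + 2)) (by omega) rest (cur + 2) (out ++ ['9', '6'])
          (log ++ ["@c -> 96"]) rfl (by omega)
        have hdrop2 : rest.drop (cur + 2) = r := by
          have h22 : rest.drop (cur + 2) = (rest.drop cur).drop 2 := by
            rw [List.drop_drop]
          rw [h22, hdr]; rfl
        simp only [Nat.sub_self, List.take_zero, List.append_nil] at hrec ⊢
        rw [hrec, hdrop2, bsLoopA]
        simp
      · by_cases h9c : c = '9'
        · -- '9' sits at cur
          subst h9c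
          have h9p : (['9'] : List Char) <+: rest.drop cur := by rw [hdr]; simp
          have hb : PySem.Chars.findFrom rest ['9'] (cur : Int) none = (cur : Int) :=
            pvFindHere rest _ cur hcur h9p
          have hcur' : cur < rest.length := by omega
          have hsA := pvFindStep rest ['@', 'c'] cur hcur' hAt
          have hnot2 : ¬ (PySem.Chars.findFrom rest ['@', 'c'] (cur : Int) none ≠ -1 ∧
              (PySem.Chars.findFrom rest ['9'] (cur : Int) none = -1 ∨
               PySem.Chars.findFrom rest ['@', 'c'] (cur : Int) none ≤
                 PySem.Chars.findFrom rest ['9'] (cur : Int) none)) := by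
            rintro ⟨hane, hor⟩
            rcases hor with h | h
            · rw [hb] at h; omega
            · rw [hsA] at hane h
              have hge := (PySem.Chars.findFrom_natCast_spec rest ['@', 'c'] (cur + 1) hcur' hane).1
              rw [hb] at h
              have : ((cur + 1 : Nat) : Int) ≤ (cur : Int) := le_trans hge h
              omega
          rw [bsLoopB]
          rw [dif_neg (by rintro ⟨-, hb9⟩; rw [hb] at hb9; omega), dif_neg hnot2]

          rw [hb]
          have htoNat : ((cur : Int)).toNat = cur := by omega
          rw [htoNat]
          have hrec := ih (rest.length - (cur + 1)) (by omega) rest (cur + 1) (out ++ ['9', '5'])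
            (log ++ ["9 -> 95"]) rfl (by omega)
          have hdrop1 := pvDropSucc rest cur '9' t hdr
          simp only [Nat.sub_self, List.take_zero, List.append_nil] at hrec ⊢
          have htake : (('9' : Char) :: t).take 2 ≠ ['@', 'c'] := by
            cases t <;> simp
          rw [hrec, hdrop1, bsLoopA, if_neg htake, if_pos rfl]
        · -- gap character
          have h9p : ¬ (['9'] : List Char) <+: rest.drop cur := by
            rw [hdr]; simp [List.cons_prefix_cons]; intro hc; exact h9c hc.symm
          rw [pvGapStep rest cur out log c t hdr hAt h9p]
          have hrec := ih (rest.length - (cur + 1)) (by omega) rest (cur + 1) (out ++ [c])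
            log rfl (by omega)
          have htake : (c :: t).take 2 ≠ ['@', 'c'] := by
            intro hc
            exact hAt (by rw [hdr, List.prefix_iff_eq_take]; exact hc.symm)
          rw [hrec, pvDropSucc rest cur c t hdr, bsLoopA, if_neg htake, if_neg h9c]

-- ===== VERDICT (by name: the statement is the Claim_ definition above) =====
theorem byte_stuffing_spec : Claim_equal_byte_stuffing := by
  intro packet _
  unfold Spec_byte_stuffing byte_stuffing byte_stuffing_alt
  show (String.mk (bsLoopA (packet.toList.drop 2) (packet.toList.take 2) []).1,
        (bsLoopA (packet.toList.drop 2) (packet.toList.take 2) []).2) =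
       (String.mk (bsLoopB (packet.toList.drop 2) 0 (packet.toList.take 2) []).1,
        (bsLoopB (packet.toList.drop 2) 0 (packet.toList.take 2) []).2)
  rw [pvLoopEq (packet.toList.drop 2).length _ 0 _ _ rfl (by omega)]
  simp
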